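-- pv_equiv track=rewrite | github.com/yejinee/Algorithm | 2023/13305.py | solution
-- ===== SOURCE A (Python) =====
-- def solution(N, road, city):
--     budget = 0
--     now = 0
--     while now<len(city)-1:
--         next = len(city)-1
--         # check
--         for idx in range(now, len(city)):
--             if city[now] > city[idx]:
--                 next = idx
--                 break
--         # get budget
--         for idx in range(now, next):
--             budget += (city[now] * road[idx])
--         now = next
--
--     return budget
-- ===== SOURCE B (Python) =====
-- def solution(N, road, city):
--     # single forward pass maintaining the running minimum price seen so far
--     budget = 0
--     m = None
--     for i in range(len(city) - 1):
--         c = city[i]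
--         if m is None or c < m:
--             m = c
--         budget += m * road[i]
--     return budget
-- ===== Notes on version B (the rewrite author's own statement) =====
-- stated objective: simpler
-- what changed: Replaced A's nested 'scan ahead to the next cheaper city, then fill the whole segment' while-loop with one flat pass that maintains a running prefix-minimum price and accumulates min_so_far * road[i].
import Mathlib
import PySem

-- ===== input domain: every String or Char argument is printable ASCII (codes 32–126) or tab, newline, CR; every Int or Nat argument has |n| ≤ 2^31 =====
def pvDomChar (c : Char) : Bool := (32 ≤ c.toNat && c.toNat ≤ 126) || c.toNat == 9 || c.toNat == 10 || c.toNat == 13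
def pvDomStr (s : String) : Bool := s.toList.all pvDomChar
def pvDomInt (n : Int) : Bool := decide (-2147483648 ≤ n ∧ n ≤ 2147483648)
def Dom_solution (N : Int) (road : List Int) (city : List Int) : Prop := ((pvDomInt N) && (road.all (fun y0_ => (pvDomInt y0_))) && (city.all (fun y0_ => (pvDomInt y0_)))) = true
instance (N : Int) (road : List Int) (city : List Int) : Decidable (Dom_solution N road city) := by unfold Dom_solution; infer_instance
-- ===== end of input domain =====

-- B is a one-pass prefix-minimum rewrite of A's segment-filling greedy; equivalence of RETURN values.
-- Indexing is always in range under Pre_solution, so list access is ported as getD _ _ 0.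

-- ===== PORT A =====
-- inner 'for idx in range(now, len(city)): if city[now] > city[idx]: next = idx; break' (scanning the listed indices)
def findGo (city : List Int) (now : Nat) : List Nat → Nat
  | [] => city.length - 1
  | idx :: rest => if city.getD now 0 > city.getD idx 0 then idx else findGo city now rest

-- the while loop; fuel = city.length bounds the iterations ('now' strictly increases, totality guard only)
def loopA (road city : List Int) : Nat → Nat → Int → Int
  | 0, _, budget => budget
  | fuel + 1, now, budget =>
    if now < city.length - 1 then
      let next := findGo city now (List.range' now (city.length - now))
      loopA road city fuel next
        ((List.range' now (next - now)).foldl (fun b idx => b + city.getD now 0 * road.getD idx 0) budget)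
    else budget

def solution (N : Int) (road : List Int) (city : List Int) : Int :=
  loopA road city city.length 0 0

-- ===== PORT B =====
-- loop body of Source B: update the running minimum (None sentinel), add m * road[i]
def stepB (road city : List Int) (s : Int × Option Int) (i : Nat) : Int × Option Int :=
  let c := city.getD i 0
  let m := match s.2 with
    | none => c
    | some v => if c < v then c else v
  (s.1 + m * road.getD i 0, some m)

def solution_alt (N : Int) (road : List Int) (city : List Int) : Int :=
  ((List.range (city.length - 1)).foldl (stepB road city) (0, none)).1

-- ===== PRECONDITION & SPEC =====
-- Pre_ excludes exactly the inputs where Python A raises IndexError: a road list shorter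
-- than len(city)-1 (A eventually reads road[idx] for every idx < len(city)-1).
def Pre_solution (N : Int) (road : List Int) (city : List Int) : Prop :=
  city.length ≤ road.length + 1
instance (N : Int) (road : List Int) (city : List Int) : Decidable (Pre_solution N road city) := by unfold Pre_solution; infer_instance
def pvWitness_solution : Int × List Int × List Int := (3, [2, 3], [5, 2, 4])

def Spec_solution (N : Int) (road : List Int) (city : List Int) (out : Int) : Prop := out = solution_alt N road city
instance (N : Int) (road : List Int) (city : List Int) (out : Int) : Decidable (Spec_solution N road city out) := by unfold Spec_solution; infer_instance

-- ===== CLAIM (what is proved, stated in full; the proofs are below) =====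
def Claim_equal_solution : Prop := ∀ (N : Int) (road : List Int) (city : List Int), Dom_solution N road city → Pre_solution N road city → Spec_solution N road city (solution N road city)

-- ===== LEMMAS AND PROOFS =====

-- prefix minimum of city[0..i]
def pm (city : List Int) : Nat → Int
  | 0 => city.getD 0 0
  | i + 1 => min (pm city i) (city.getD (i + 1) 0)

-- Σ_{i<n} pm i * road[i] : the common value of both programs
def Ssum (road city : List Int) : Nat → Int
  | 0 => 0
  | n + 1 => Ssum road city n + pm city n * road.getD n 0

lemma findGo_range' (city : List Int) (now : Nat) :
    ∀ k a, (findGo city now (List.range' a k) = city.length - 1 ∧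
        ∀ i, a ≤ i → i < a + k → ¬(city.getD i 0 < city.getD now 0)) ∨
      (a ≤ findGo city now (List.range' a k) ∧ findGo city now (List.range' a k) < a + k ∧
        city.getD (findGo city now (List.range' a k)) 0 < city.getD now 0 ∧
        ∀ i, a ≤ i → i < findGo city now (List.range' a k) → ¬(city.getD i 0 < city.getD now 0)) := by
  intro k
  induction k with
  | zero => intro a; left; constructor; · rfl
            · intro i h1 h2; omega
  | succ k ih =>
    intro a
    rw [List.range'_succ]
    by_cases h : city.getD a 0 < city.getD now 0
    · right
      simp only [findGo, if_pos h]
      exact ⟨le_refl a, by omega, h, fun i h1 h2 => by omega⟩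
    · have hfg : findGo city now (a :: List.range' (a+1) k) = findGo city now (List.range' (a+1) k) := by
        simp only [findGo]
        rw [if_neg h]
      rw [hfg]
      rcases ih (a+1) with ⟨h1, h2⟩ | ⟨h1, h2, h3, h4⟩
      · left
        refine ⟨h1, fun i hi1 hi2 => ?_⟩
        rcases Nat.eq_or_lt_of_le hi1 with rfl | hi
        · exact h
        · exact h2 i hi (by omega)
      · right
        refine ⟨by omega, by omega, h3, fun i hi1 hi2 => ?_⟩
        rcases Nat.eq_or_lt_of_le hi1 with rfl | hi
        · exact h
        · exact h4 i hi hi2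

lemma pm_const (city : List Int) (now nx : Nat)
    (hnow : pm city now = city.getD now 0)
    (hge : ∀ i, now ≤ i → i < nx → ¬(city.getD i 0 < city.getD now 0)) :
    ∀ i, now ≤ i → i < nx → pm city i = city.getD now 0 := by
  intro i
  induction i with
  | zero =>
    intro h1 _
    have : now = 0 := by omega
    subst this; exact hnow
  | succ i ih =>
    intro h1 h2
    rcases Nat.eq_or_lt_of_le h1 with h | h
    · rw [← h]; exact hnow
    · have hi : now ≤ i := by omega
      have hpi : pm city i = city.getD now 0 := ih hi (by omega)
      have hgi : ¬(city.getD (i+1) 0 < city.getD now 0) := hge (i+1) (by omega) h2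
      simp only [pm, hpi]
      omega

lemma seg_sum (road city : List Int) (c : Int) :
    ∀ k a b0, (∀ i, a ≤ i → i < a + k → pm city i = c) →
      (List.range' a k).foldl (fun b idx => b + c * road.getD idx 0) b0
        = b0 + Ssum road city (a + k) - Ssum road city a := by
  intro k
  induction k with
  | zero => intro a b0 _; simp
  | succ k ih =>
    intro a b0 h
    rw [List.range'_succ]
    simp only [List.foldl_cons]
    have h' : ∀ i, a + 1 ≤ i → i < (a + 1) + k → pm city i = c := fun i h1 h2 => h i (by omega) (by omega)
    rw [ih (a+1) (b0 + c * road.getD a 0) h']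
    have hSa : Ssum road city (a + 1) = Ssum road city a + pm city a * road.getD a 0 := rfl
    have hpa : pm city a = c := h a (le_refl a) (by omega)
    have : a + 1 + k = a + (k + 1) := by omega
    rw [this] at *
    rw [hSa, hpa]
    ring

lemma loopA_eq (road city : List Int) :
    ∀ fuel now b, city.length - 1 - now ≤ fuel → now ≤ city.length - 1 →
      (now < city.length - 1 → pm city now = city.getD now 0) →
      loopA road city fuel now b = b + Ssum road city (city.length - 1) - Ssum road city now := by
  intro fuel
  induction fuel with
  | zero =>
    intro now b h1 h2 _
    have : now = city.length - 1 := by omega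
    subst this
    simp [loopA]
  | succ fuel ih =>
    intro now b h1 h2 h3
    by_cases hlt : now < city.length - 1
    · have hL2 : 2 ≤ city.length := by omega
      set nx := findGo city now (List.range' now (city.length - now)) with hnx
      have hf := findGo_range' city now (city.length - now) now
      have hnow_le_L : now + (city.length - now) = city.length := by omega
      have f1 : now < nx := by
        rcases hf with ⟨he, _⟩ | ⟨hg1, hg2, hg3, _⟩
        · rw [← hnx] at he; omega
        · rw [← hnx] at hg1 hg3
          rcases Nat.eq_or_lt_of_le hg1 with h | h
          · exfalso; rw [← h] at hg3; exact lt_irrefl _ hg3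
          · exact h
      have f2 : nx ≤ city.length - 1 := by
        rcases hf with ⟨he, _⟩ | ⟨_, hg2, _, _⟩
        · rw [← hnx] at he; omega
        · rw [← hnx] at hg2; omega
      have f3 : ∀ i, now ≤ i → i < nx → ¬(city.getD i 0 < city.getD now 0) := by
        rcases hf with ⟨he, hall⟩ | ⟨_, _, _, hall⟩
        · intro i hi1 hi2
          exact hall i hi1 (by rw [← hnx] at he; omega)
        · rw [← hnx] at hall; exact hall
      have f4 : nx < city.length - 1 → city.getD nx 0 < city.getD now 0 := by
        rcases hf with ⟨he, _⟩ | ⟨_, _, hg3, _⟩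
        · rw [← hnx] at he; omega
        · rw [← hnx] at hg3; exact fun _ => hg3
      have p1 : ∀ i, now ≤ i → i < nx → pm city i = city.getD now 0 :=
        pm_const city now nx (h3 hlt) f3
      -- the segment fold
      have hnn : now + (nx - now) = nx := by omega
      have hseg : (List.range' now (nx - now)).foldl
          (fun b idx => b + city.getD now 0 * road.getD idx 0) b
            = b + Ssum road city nx - Ssum road city now := by
        have hs := seg_sum road city (city.getD now 0) (nx - now) now b
          (fun i h1 h2 => p1 i h1 (by omega))
        rw [hnn] at hs
        exact hs
      -- invariant at nx
      have p2 : nx < city.length - 1 → pm city nx = city.getD nx 0 := by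
        intro hnxlt
        rcases Nat.exists_eq_add_of_lt f1 with ⟨m, hm⟩
        have hnxm : nx = (now + m) + 1 := by omega
        rw [hnxm]
        have hpm : pm city (now + m) = city.getD now 0 := p1 (now + m) (by omega) (by omega)
        simp only [pm, hpm]
        have := f4 (by omega)
        rw [hnxm] at this
        omega
      have hrec := ih nx (b + Ssum road city nx - Ssum road city now)
        (by omega) (by omega) p2
      simp only [loopA]
      rw [if_pos hlt, ← hnx, hseg, hrec]
      ring
    · have : now = city.length - 1 := by omega
      subst this
      simp [loopA]

lemma foldB_eq (road city : List Int) :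
    ∀ n, (List.range (n + 1)).foldl (stepB road city) (0, none)
      = (Ssum road city (n + 1), some (pm city n)) := by
  intro n
  induction n with
  | zero =>
    simp [List.range_one, stepB, Ssum, pm]
  | succ n ih =>
    rw [List.range_succ, List.foldl_append, ih]
    simp only [List.foldl_cons, List.foldl_nil, stepB]
    have hm : (if city.getD (n+1) 0 < pm city n then city.getD (n+1) 0 else pm city n)
        = pm city (n + 1) := by
      simp only [pm]
      omega
    rw [hm]
    rfl

-- ===== VERDICT (by name: the statement is the Claim_ definition above) =====
theorem solution_spec : Claim_equal_solution := by
  intro N road city _ _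
  show solution N road city = solution_alt N road city
  unfold solution solution_alt
  rw [loopA_eq road city city.length 0 0 (by omega) (by omega) (fun _ => rfl)]
  cases h : city.length - 1 with
  | zero => simp [Ssum]
  | succ n => rw [foldB_eq]; simp [Ssum]
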